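-- pv_equiv track=rewrite | github.com/ghostersk/PyMTA-server | email_server/email_relay.py | _prepare_email_for_recipient
-- ===== SOURCE A (Python) =====
-- def _prepare_email_for_recipient(content: str, bcc_recipient: str = None) -> str:
--     """Prepare a copy of the email for a specific recipient without modifying original content.
--
--     Args:
--         content: The original signed email content
--         bcc_recipient: If specified, prepare content for this BCC recipient
--
--     Returns:
--         str: Email content ready for the specific recipient
--     """
--     lines = content.splitlines()
--     new_lines = []
--     headers_done = False
--     empty_line_added = False
--
--     for line in lines:
--         if not headers_done:
--             if line.strip() == '':
--                 headers_done = True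
--                 empty_line_added = True
--                 new_lines.append(line)  # Keep the empty line separator
--             # Skip BCC headers
--             elif not line.lower().startswith('bcc:'):
--                 new_lines.append(line)
--         else:
--             new_lines.append(line)
--
--     # Ensure there's a blank line between headers and body if not already present
--     if not empty_line_added:
--         new_lines.append('')
--
--     return '\r\n'.join(new_lines)
-- ===== SOURCE B (Python) =====
-- def _prepare_email_for_recipient(content: str, bcc_recipient: str = None) -> str:
--     """Find the header/body boundary first, then filter BCC headers only from the
--     header slice; the separator line and body are carried verbatim by slicing."""
--     lines = content.splitlines()
--     sep = next((i for i, l in enumerate(lines) if l.strip() == ''), None)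
--     if sep is None:
--         return '\r\n'.join([l for l in lines if not l.lower().startswith('bcc:')] + [''])
--     headers = [l for l in lines[:sep] if not l.lower().startswith('bcc:')]
--     return '\r\n'.join(headers + lines[sep:])
-- ===== Notes on version B (the rewrite author's own statement) =====
-- stated objective: simpler
-- what changed: Replaces A's headers_done/empty_line_added state-machine loop with a find-first-blank-line scan followed by filtering BCC headers only from the header slice and carrying the separator and body verbatim via slicing.
import Mathlib
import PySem

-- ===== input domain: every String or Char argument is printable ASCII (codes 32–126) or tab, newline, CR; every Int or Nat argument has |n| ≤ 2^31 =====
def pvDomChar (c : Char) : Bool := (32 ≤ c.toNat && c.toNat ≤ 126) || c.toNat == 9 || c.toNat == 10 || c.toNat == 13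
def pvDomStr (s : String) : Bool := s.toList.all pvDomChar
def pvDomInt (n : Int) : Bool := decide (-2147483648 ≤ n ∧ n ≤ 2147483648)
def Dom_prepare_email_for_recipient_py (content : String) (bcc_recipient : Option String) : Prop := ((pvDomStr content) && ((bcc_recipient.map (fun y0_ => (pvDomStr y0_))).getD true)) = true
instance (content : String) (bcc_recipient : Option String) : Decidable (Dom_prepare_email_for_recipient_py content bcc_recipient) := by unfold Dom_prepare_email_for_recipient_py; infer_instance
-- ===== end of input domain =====

-- B replaces A's headers_done/empty_line_added state-machine loop by locating the first
-- blank line, filtering BCC headers only from the header slice and carrying the rest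
-- verbatim (objective: simpler decomposition, same cost).

-- ===== PORT A =====
-- one step of A's for-loop; state = (new_lines, headers_done, empty_line_added)
def pvStepA (st : List String × Bool × Bool) (line : String) : List String × Bool × Bool :=
  let (nl, hd, el) := st
  if !hd then
    if PySem.Str.strip line == "" then (nl ++ [line], true, true)
    else if PySem.Str.startswith (PySem.Str.lower line) "bcc:" then (nl, hd, el)
    else (nl ++ [line], hd, el)
  else (nl ++ [line], hd, el)

def prepare_email_for_recipient_py (content : String) (_bcc_recipient : Option String) : String :=
  let lines := PySem.Str.splitlines content
  let res := List.foldl pvStepA ([], false, false) lines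
  let new_lines := res.1
  let empty_line_added := res.2.2
  let new_lines := if !empty_line_added then new_lines ++ [""] else new_lines
  PySem.Str.join "\r\n" new_lines

-- ===== PORT B =====
def pvKeep (l : String) : Bool := !PySem.Str.startswith (PySem.Str.lower l) "bcc:"

def prepare_email_for_recipient_py_alt (content : String) (_bcc_recipient : Option String) : String :=
  let lines := PySem.Str.splitlines content
  match lines.findIdx? (fun l => PySem.Str.strip l == "") with
  | none => PySem.Str.join "\r\n" (lines.filter pvKeep ++ [""])
  | some sep => PySem.Str.join "\r\n" ((lines.take sep).filter pvKeep ++ lines.drop sep)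

-- ===== PRECONDITION & SPEC =====
def Spec_prepare_email_for_recipient_py (content : String) (bcc_recipient : Option String) (out : String) : Prop := out = prepare_email_for_recipient_py_alt content bcc_recipient
instance (content : String) (bcc_recipient : Option String) (out : String) : Decidable (Spec_prepare_email_for_recipient_py content bcc_recipient out) := by unfold Spec_prepare_email_for_recipient_py; infer_instance

-- ===== CLAIM (what is proved, stated in full; the proofs are below) =====
def Claim_equal_prepare_email_for_recipient_py : Prop := ∀ (content : String) (bcc_recipient : Option String), Dom_prepare_email_for_recipient_py content bcc_recipient → Spec_prepare_email_for_recipient_py content bcc_recipient (prepare_email_for_recipient_py content bcc_recipient)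

-- ===== LEMMAS AND PROOFS =====
lemma pvLoop_done (lines acc : List String) (el : Bool) :
    List.foldl pvStepA (acc, true, el) lines = (acc ++ lines, true, el) := by
  induction lines generalizing acc with
  | nil => simp
  | cons l rest ih => simp [pvStepA, ih]

lemma pvLoop_main (lines : List String) : ∀ acc : List String,
    List.foldl pvStepA (acc, false, false) lines =
      match lines.findIdx? (fun l => PySem.Str.strip l == "") with
      | none => (acc ++ lines.filter pvKeep, false, false)
      | some i => (acc ++ ((lines.take i).filter pvKeep ++ lines.drop i), true, true) := by
  induction lines with
  | nil => simp
  | cons l rest ih =>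
    intro acc
    by_cases hb : (PySem.Str.strip l == "") = true
    · simp [List.foldl, pvStepA, hb, List.findIdx?_cons, pvLoop_done]
    · cases hbcc : PySem.Chars.startswith (PySem.Chars.lower l.toList) ['b', 'c', 'c', ':'] with
      | false =>
        have hstep : pvStepA (acc, false, false) l = (acc ++ [l], false, false) := by
          simp [pvStepA, hb, hbcc]
        rw [List.foldl_cons, hstep, ih (acc ++ [l])]
        cases h : rest.findIdx? (fun l => PySem.Str.strip l == "") with
        | none => simp [List.findIdx?_cons, hb, h, pvKeep, hbcc]
        | some i => simp [List.findIdx?_cons, hb, h, pvKeep, hbcc]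
      | true =>
        have hstep : pvStepA (acc, false, false) l = (acc, false, false) := by
          simp [pvStepA, hb, hbcc]
        rw [List.foldl_cons, hstep, ih acc]
        cases h : rest.findIdx? (fun l => PySem.Str.strip l == "") with
        | none => simp [List.findIdx?_cons, hb, h, pvKeep, hbcc]
        | some i => simp [List.findIdx?_cons, hb, h, pvKeep, hbcc]

-- ===== VERDICT (by name: the statement is the Claim_ definition above) =====
theorem prepare_email_for_recipient_py_spec : Claim_equal_prepare_email_for_recipient_py := by
  intro content bcc _
  unfold Spec_prepare_email_for_recipient_py prepare_email_for_recipient_py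
    prepare_email_for_recipient_py_alt
  simp only []
  rw [pvLoop_main (PySem.Str.splitlines content) []]
  cases h : (PySem.Str.splitlines content).findIdx? (fun l => PySem.Str.strip l == "") with
  | none => simp
  | some i => simp
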